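-- pv_equiv track=rewrite | github.com/novanjanis322/algorithms-from-scratch | searching/binary_search.py | find_insertion_position
-- ===== SOURCE A (Python) =====
-- from typing import List, Optional
--
-- def find_insertion_position(arr: List[int], target: int) -> int:
--     """
--     Find the position where target should be inserted to maintain sorted order.
--
--     HINT:
--     - Similar to binary search but no exact match needed
--     - When arr[mid] < target: go right (left = mid + 1)
--     - When arr[mid] >= target: go left (right = mid - 1)
--     - Return 'left' at the end (it will be the insertion position)
--
--     Args:
--         arr: Sorted list of integers
--         target: Value to insert
--
--     Returns:
--         Index where target should be inserted
--
--     Example: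
--         [1, 3, 5, 7] target=4 -> should return 2 (insert between 3 and 5)
--     """
--     left = 0
--     right = len(arr) - 1
--     while left <= right:
--         mid = left + (right - left) // 2
--         if arr[mid] < target:
--             left = mid + 1
--         else:
--             right = mid - 1
--     return left
-- ===== SOURCE B (Python) =====
-- def find_insertion_position(arr, target):
--     """Insertion index in a sorted list = number of elements strictly less
--     than target (one linear pass instead of a binary search)."""
--     count = 0
--     for x in arr:
--         if x < target:
--             count += 1
--     return count
-- ===== Notes on version B (the rewrite author's own statement) =====
-- stated objective: simpler
-- what changed: Replaces the binary search over index bounds with a single linear pass counting elements strictly less than target, which equals bisect_left on every input whose below-target elements form a prefix (in particular every sorted input, the documented domain).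
-- outside the precondition, e.g. on find_insertion_position([3, 1, 2], 2): A returns 2, B returns 1
import Mathlib
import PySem

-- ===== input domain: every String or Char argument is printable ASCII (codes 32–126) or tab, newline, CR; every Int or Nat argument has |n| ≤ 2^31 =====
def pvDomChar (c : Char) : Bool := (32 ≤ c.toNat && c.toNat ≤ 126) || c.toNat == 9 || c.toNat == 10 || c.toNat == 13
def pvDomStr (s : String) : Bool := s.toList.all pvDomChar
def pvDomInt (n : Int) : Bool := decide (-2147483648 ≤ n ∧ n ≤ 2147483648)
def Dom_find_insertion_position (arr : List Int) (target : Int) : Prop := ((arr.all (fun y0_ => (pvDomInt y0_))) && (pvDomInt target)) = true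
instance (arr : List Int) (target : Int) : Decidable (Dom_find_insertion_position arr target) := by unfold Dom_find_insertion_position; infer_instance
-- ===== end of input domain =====

-- B replaces A's binary search with a single linear pass counting elements strictly
-- below target (simpler); equal to A whenever the below-target elements form a prefix
-- of arr, which covers every sorted input, the function's documented domain.


-- ===== PORT A =====
-- the while-loop of A: state (left, right), terminates because right - left shrinks;
-- arr[mid] is always in range (0 ≤ left ≤ mid ≤ right ≤ len-1 whenever it is read),
-- so pyGetD's default 0 is never used.
def findInsLoop (arr : List Int) (target : Int) : Nat → Int → Int → Int
  | 0, l, _ => l  -- fuel never runs out: each iteration shrinks the interval [l, r]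
  | fuel + 1, l, r =>
    if l ≤ r then
      let mid := l + PySem.Int.floordiv (r - l) 2
      if PySem.List.pyGetD arr mid 0 < target then
        findInsLoop arr target fuel (mid + 1) r
      else
        findInsLoop arr target fuel l (mid - 1)
    else l

def find_insertion_position (arr : List Int) (target : Int) : Int :=
  findInsLoop arr target (arr.length + 1) 0 ((arr.length : Int) - 1)

-- ===== PORT B =====
-- one pass over the list, counting elements strictly less than target
def find_insertion_position_alt (arr : List Int) (target : Int) : Int :=
  arr.foldl (fun count x => if x < target then count + 1 else count) 0

-- ===== PRECONDITION & SPEC =====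
-- Pre_ requires the elements below target to form a prefix of arr — true of every sorted
-- list, the function's documented input domain ("arr: Sorted list of integers"); on other,
-- unsorted inputs A still returns, but its value is an accident of which elements the
-- binary search happens to probe and is not the insertion index.
def Pre_find_insertion_position (arr : List Int) (target : Int) : Prop :=
  arr.Pairwise (fun a b => b < target → a < target)
instance (arr : List Int) (target : Int) : Decidable (Pre_find_insertion_position arr target) := by unfold Pre_find_insertion_position; infer_instance

def pvWitness_find_insertion_position : List Int × Int := ([1, 3, 3, 5, 7], 4)

def Spec_find_insertion_position (arr : List Int) (target : Int) (out : Int) : Prop := out = find_insertion_position_alt arr target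
instance (arr : List Int) (target : Int) (out : Int) : Decidable (Spec_find_insertion_position arr target out) := by unfold Spec_find_insertion_position; infer_instance

-- ===== CLAIM (what is proved, stated in full; the proofs are below) =====
def Claim_equal_find_insertion_position : Prop := ∀ (arr : List Int) (target : Int), Dom_find_insertion_position arr target → Pre_find_insertion_position arr target → Spec_find_insertion_position arr target (find_insertion_position arr target)

-- ===== LEMMAS AND PROOFS =====

-- B's fold is countP, as an Int
lemma alt_eq_countP (arr : List Int) (target : Int) :
    find_insertion_position_alt arr target = (arr.countP (fun x => x < target) : Int) := by
  unfold find_insertion_position_alt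
  suffices h : ∀ c : Int,
      arr.foldl (fun count x => if x < target then count + 1 else count) c
        = c + (arr.countP (fun x => x < target) : Int) by
    simpa using h 0
  induction arr with
  | nil => intro c; simp
  | cons x xs ih =>
    intro c
    by_cases hx : x < target <;>
      simp [List.foldl_cons, hx, ih]; ring

-- a list whose first n positions satisfy p and whose later positions do not has countP = n
lemma countP_eq_of_split (p : Int → Bool) (xs : List Int) (n : Nat)
    (hn : n ≤ xs.length)
    (h1 : ∀ i (h : i < xs.length), i < n → p xs[i])
    (h2 : ∀ i (h : i < xs.length), n ≤ i → ¬ p xs[i]) :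
    xs.countP p = n := by
  have hsplit : xs = xs.take n ++ xs.drop n := (List.take_append_drop n xs).symm
  rw [hsplit, List.countP_append]
  have htake : (xs.take n).countP p = n := by
    have hlen : (xs.take n).length = n := by simp [hn]
    have : (xs.take n).countP p = (xs.take n).length := by
      rw [List.countP_eq_length]
      intro a ha
      obtain ⟨i, hi, hgi⟩ := List.mem_iff_getElem.mp ha
      have hi' : i < xs.length := by omega
      have : (xs.take n)[i] = xs[i] := List.getElem_take
      rw [this] at hgi
      exact hgi ▸ h1 i hi' (by omega)
    omega
  have hdrop : (xs.drop n).countP p = 0 := by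
    rw [List.countP_eq_zero]
    intro a ha
    obtain ⟨i, hi, hgi⟩ := List.mem_iff_getElem.mp ha
    have hlen : (xs.drop n).length = xs.length - n := by simp
    have hi' : n + i < xs.length := by omega
    have : (xs.drop n)[i] = xs[n + i] := by simp [List.getElem_drop]
    rw [this] at hgi
    exact hgi ▸ h2 (n + i) hi' (by omega)
  omega

-- loop invariant: everything left of l is < target, everything right of r is ≥ target
lemma findInsLoop_eq (arr : List Int) (t : Int)
    (hs : arr.Pairwise (fun a b => b < t → a < t)) :
    ∀ fuel : Nat, ∀ l r : Int, (r + 1 - l).toNat ≤ fuel →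
      0 ≤ l → l ≤ (arr.length : Int) → r ≤ (arr.length : Int) - 1 →
      (∀ i (h : i < arr.length), (i : Int) < l → arr[i] < t) →
      (∀ i (h : i < arr.length), r < (i : Int) → t ≤ arr[i]) →
      findInsLoop arr t fuel l r = (arr.countP (fun x => x < t) : Int) := by
  intro fuel
  induction fuel with
  | zero =>
    intro l r hfuel hl0 hlen hr h1 h2
    have hlr : r < l := by omega
    rw [findInsLoop]
    have : arr.countP (fun x => x < t) = l.toNat := by
      apply countP_eq_of_split
      · omega
      · intro i hi hilt
        simpa using h1 i hi (by omega)
      · intro i hi hige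
        have := h2 i hi (by omega)
        simp; omega
    omega
  | succ n ih =>
    intro l r hfuel hl0 hlen hr h1 h2
    rw [findInsLoop]
    by_cases hlr : l ≤ r
    · simp only [if_pos hlr]
      set mid := l + PySem.Int.floordiv (r - l) 2 with hmid
      have hb := PySem.Int.floordiv_two_mid_bounds (lo := 0) (hi := r - l) (by omega)
      have heq : PySem.Int.floordiv (0 + (r - l)) 2 = PySem.Int.floordiv (r - l) 2 := by
        norm_num
      rw [heq] at hb
      have hmid1 : l ≤ mid := by omega
      have hmid2 : mid ≤ r := by omega
      have hmidlt : mid.toNat < arr.length := by omega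
      have hget : PySem.List.pyGetD arr mid 0 = arr[mid.toNat] := by
        exact PySem.List.pyGetD_eq_getElem arr 0 (by omega) (by omega)
      -- the prefix property: a later element below t forces every earlier one below t
      have hpfx : ∀ i j (hi : i < arr.length) (hj : j < arr.length), i ≤ j →
          arr[j] < t → arr[i] < t := by
        intro i j hi hj hij hjt
        rcases Nat.eq_or_lt_of_le hij with h | h
        · subst h; exact hjt
        · exact List.pairwise_iff_getElem.mp hs i j hi hj h hjt
      rw [hget]
      by_cases hc : arr[mid.toNat] < t
      · simp only [if_pos hc]
        apply ih (mid + 1) r (by omega) (by omega) (by omega) hr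
        · intro i hi hilt
          exact hpfx i mid.toNat hi hmidlt (by omega) hc
        · exact h2
      · simp only [if_neg hc]
        apply ih l (mid - 1) (by omega) (by omega) hlen (by omega) h1
        · intro i hi hgt
          by_contra hlt
          exact hc (hpfx mid.toNat i hmidlt hi (by omega) (by omega))
    · simp only [if_neg hlr]
      have : arr.countP (fun x => x < t) = l.toNat := by
        apply countP_eq_of_split
        · omega
        · intro i hi hilt
          simpa using h1 i hi (by omega)
        · intro i hi hige
          have := h2 i hi (by omega)
          simp; omega
      omega

-- ===== VERDICT (by name: the statement is the Claim_ definition above) =====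
theorem find_insertion_position_spec : Claim_equal_find_insertion_position := by
  intro arr target _hdom hpre
  unfold Spec_find_insertion_position find_insertion_position
  rw [alt_eq_countP]
  exact findInsLoop_eq arr target hpre (arr.length + 1) 0
    ((arr.length : Int) - 1) (by omega) (by omega) (by omega) (by omega)
    (by intro i hi h; omega) (by intro i hi h; omega)
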